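-- pv_equiv track=rewrite | github.com/chrislucas/hackerrank-ds | python/DisjointSet/hackerrank/KunduAndTree.py | solver2
-- ===== SOURCE A (Python) =====
-- def add_mod(a, b, m):
--     return (a % m + b % m) % m
--
-- def multiply_mod(a, b, m):
--     return (a % m * b % m) % m
--
-- def solver2(counter):
--     mod = 1000000007
--     nodes = len(counter)
--     res = 0
--     for i in range(0, nodes):
--         for j in range(i+1, nodes):
--             for k in range(j+1, nodes):
--                 # (res + ((c[i] * c[j] * c[k]) % mod)) % mod
--                 res = add_mod(res, multiply_mod(multiply_mod(counter[i], counter[j], mod), counter[k], mod), mod)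
--     return res
-- ===== SOURCE B (Python) =====
-- def solver2(counter):
--     mod = 1000000007
--     e1 = 0
--     e2 = 0
--     e3 = 0
--     for x in counter:
--         e3 = (e3 + e2 * x) % mod
--         e2 = (e2 + e1 * x) % mod
--         e1 = (e1 + x) % mod
--     return e3
-- ===== Notes on version B (the rewrite author's own statement) =====
-- stated objective: faster
-- what changed: Replaced the O(n^3) triple nested loop over index triples by a single pass maintaining the running elementary symmetric polynomials e1,e2,e3 modulo 1000000007.
import Mathlib
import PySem

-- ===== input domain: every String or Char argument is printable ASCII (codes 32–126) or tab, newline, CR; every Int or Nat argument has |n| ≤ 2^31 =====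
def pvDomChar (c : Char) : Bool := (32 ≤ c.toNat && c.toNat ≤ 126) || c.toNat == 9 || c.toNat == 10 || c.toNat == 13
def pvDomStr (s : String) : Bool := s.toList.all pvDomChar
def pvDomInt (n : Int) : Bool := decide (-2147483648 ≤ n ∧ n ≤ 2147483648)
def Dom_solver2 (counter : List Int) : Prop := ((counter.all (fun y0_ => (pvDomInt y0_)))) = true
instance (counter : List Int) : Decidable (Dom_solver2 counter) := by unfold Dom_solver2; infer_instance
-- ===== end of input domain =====

-- B replaces A's O(n^3) loop over index triples by one O(n) pass maintaining the running
-- elementary symmetric polynomials e1, e2, e3 modulo 1000000007.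

-- ===== PORT A =====
def add_mod (a b m : Int) : Int := PySem.Int.mod (PySem.Int.mod a m + PySem.Int.mod b m) m

def multiply_mod (a b m : Int) : Int := PySem.Int.mod (PySem.Int.mod (PySem.Int.mod a m * b) m) m

-- counter[i]/counter[j]/counter[k] can raise in Python, but every index drawn from the ranges
-- is in bounds here, so the default of pyGetD is never consulted.
def solver2 (counter : List Int) : Int :=
  let mod : Int := 1000000007
  let nodes : Int := counter.length
  (PySem.List.pyRange 0 nodes 1).foldl (fun res i =>
    (PySem.List.pyRange (i+1) nodes 1).foldl (fun res j =>
      (PySem.List.pyRange (j+1) nodes 1).foldl (fun res k =>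
        add_mod res (multiply_mod (multiply_mod (PySem.List.pyGetD counter i 0) (PySem.List.pyGetD counter j 0) mod) (PySem.List.pyGetD counter k 0) mod) mod) res) res) 0

-- ===== PORT B =====
def solver2_alt (counter : List Int) : Int :=
  let mod : Int := 1000000007
  let st := counter.foldl (fun (st : Int × Int × Int) x =>
      let e3 := PySem.Int.mod (st.2.2 + st.2.1 * x) mod
      let e2 := PySem.Int.mod (st.2.1 + st.1 * x) mod
      let e1 := PySem.Int.mod (st.1 + x) mod
      (e1, e2, e3)) (0, 0, 0)
  st.2.2

-- ===== PRECONDITION & SPEC =====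
def Spec_solver2 (counter : List Int) (out : Int) : Prop := out = solver2_alt counter
instance (counter : List Int) (out : Int) : Decidable (Spec_solver2 counter out) := by unfold Spec_solver2; infer_instance

-- ===== CLAIM (what is proved, stated in full; the proofs are below) =====
def Claim_equal_solver2 : Prop := ∀ (counter : List Int), Dom_solver2 counter → Spec_solver2 counter (solver2 counter)

-- ===== LEMMAS AND PROOFS =====

-- sum of products over pairs / triples of distinct positions (the exact value both programs reduce mod 10^9+7)
def s2p : List Int → Int
  | [] => 0
  | x :: t => x * t.sum + s2p t

def s3p : List Int → Int
  | [] => 0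
  | x :: t => x * s2p t + s3p t

theorem emod_mul_left (a b n : Int) : (a % n * b) % n = (a * b) % n := by
  rw [Int.mul_emod (a % n) b, Int.emod_emod_of_dvd a dvd_rfl, ← Int.mul_emod]

theorem emod_add_mul_emod (a b c n : Int) : (a % n + (b % n) * c) % n = (a + b * c) % n := by
  rw [Int.add_emod (a % n), Int.emod_emod_of_dvd a dvd_rfl, emod_mul_left, ← Int.add_emod]

theorem add_mod_eq (a b : Int) : add_mod a b 1000000007 = (a + b) % 1000000007 := by
  unfold add_mod
  rw [PySem.Int.mod_eq_emod_of_pos (by norm_num), PySem.Int.mod_eq_emod_of_pos (by norm_num),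
      PySem.Int.mod_eq_emod_of_pos (by norm_num), Int.emod_add_emod, Int.add_emod_emod]

theorem multiply_mod_eq (a b : Int) : multiply_mod a b 1000000007 = (a * b) % 1000000007 := by
  unfold multiply_mod
  rw [PySem.Int.mod_eq_emod_of_pos (by norm_num), PySem.Int.mod_eq_emod_of_pos (by norm_num),
      PySem.Int.mod_eq_emod_of_pos (by norm_num), Int.emod_emod_of_dvd _ dvd_rfl, emod_mul_left]

-- generic shape of A's loops: fold that adds g k and reduces mod m at each step
theorem foldl_mod (m : Int) (F : Int → Int → Int) (g : Int → Int)
    (hF : ∀ r k, r % m = r → F r k = (r + g k) % m) :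
    ∀ (l : List Int) (r : Int), r % m = r → l.foldl F r = (r + (l.map g).sum) % m := by
  intro l
  induction l with
  | nil => intro r hr; simpa using hr.symm
  | cons a t ih =>
    intro r hr
    rw [List.foldl_cons, hF r a hr, ih _ (Int.emod_emod_of_dvd _ dvd_rfl),
        Int.emod_add_emod, List.map_cons, List.sum_cons, add_assoc]

-- index-level sums appearing in A's fold (innermost terms carry Python's % m)
def idxS3 (counter : List Int) (i j : Int) : Int :=
  ((PySem.List.pyRange (j+1) (counter.length : Int) 1).map
    (fun k => (PySem.List.pyGetD counter i 0 * PySem.List.pyGetD counter j 0 * PySem.List.pyGetD counter k 0) % 1000000007)).sum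

def idxS2 (counter : List Int) (i : Int) : Int :=
  ((PySem.List.pyRange (i+1) (counter.length : Int) 1).map (idxS3 counter i)).sum

def idxS1 (counter : List Int) : Int :=
  ((PySem.List.pyRange 0 (counter.length : Int) 1).map (idxS2 counter)).sum

theorem solver2_eq_idx (counter : List Int) :
    solver2 counter = idxS1 counter % 1000000007 := by
  unfold solver2
  simp only [add_mod_eq, multiply_mod_eq, emod_mul_left]
  rw [foldl_mod 1000000007 _ (idxS2 counter)
      (fun r i hr => foldl_mod 1000000007 _ (idxS3 counter i)
        (fun r j hr => foldl_mod 1000000007 _ _ (fun r k hr => rfl) _ r hr) _ r hr)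
      _ 0 (Int.zero_emod _), zero_add]
  rfl

-- the same sums without the inner mod
def pS3 (counter : List Int) (i j : Int) : Int :=
  ((PySem.List.pyRange (j+1) (counter.length : Int) 1).map
    (fun k => PySem.List.pyGetD counter i 0 * PySem.List.pyGetD counter j 0 * PySem.List.pyGetD counter k 0)).sum

def pS2 (counter : List Int) (i : Int) : Int :=
  ((PySem.List.pyRange (i+1) (counter.length : Int) 1).map (pS3 counter i)).sum

def pS1 (counter : List Int) : Int :=
  ((PySem.List.pyRange 0 (counter.length : Int) 1).map (pS2 counter)).sum

theorem idxS3_mod (counter : List Int) (i j : Int) :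
    idxS3 counter i j % 1000000007 = pS3 counter i j % 1000000007 := by
  unfold idxS3 pS3
  conv_rhs => rw [List.sum_int_mod, List.map_map]
  rfl

theorem idxS2_mod (counter : List Int) (i : Int) :
    idxS2 counter i % 1000000007 = pS2 counter i % 1000000007 := by
  unfold idxS2 pS2
  rw [List.sum_int_mod, List.map_map, List.sum_int_mod (List.map (pS3 counter i) _), List.map_map]
  exact congrArg (fun l => List.sum l % 1000000007)
    (List.map_congr_left (fun j _ => idxS3_mod counter i j))

theorem idxS1_mod (counter : List Int) :
    idxS1 counter % 1000000007 = pS1 counter % 1000000007 := by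
  unfold idxS1 pS1
  rw [List.sum_int_mod, List.map_map, List.sum_int_mod (List.map (pS2 counter) _), List.map_map]
  exact congrArg (fun l => List.sum l % 1000000007)
    (List.map_congr_left (fun i _ => idxS2_mod counter i))

theorem pS3_eq (counter : List Int) (i j : Int) (hj : 0 ≤ j) :
    pS3 counter i j = PySem.List.pyGetD counter i 0 * PySem.List.pyGetD counter j 0 *
      (counter.drop (j+1).toNat).sum := by
  unfold pS3
  rw [List.sum_map_mul_left, PySem.List.map_pyGetD_pyRange' counter 0 (by omega)]

-- Σ_{j∈range(a,n)} c_j * sum (drop (j+1)) = s2p (drop a), by fuel induction on n - a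
theorem q2_eq (counter : List Int) :
    ∀ (t : Nat) (a : Int), 0 ≤ a → ((counter.length : Int) - a).toNat ≤ t →
    ((PySem.List.pyRange a (counter.length : Int) 1).map
      (fun j => PySem.List.pyGetD counter j 0 * (counter.drop (j+1).toNat).sum)).sum
      = s2p (counter.drop a.toNat) := by
  intro t
  induction t with
  | zero =>
    intro a ha hle
    rw [PySem.List.pyRange_one_eq_nil (by omega), List.drop_eq_nil_of_le (by omega)]
    rfl
  | succ t ih =>
    intro a ha hle
    by_cases h : (counter.length : Int) ≤ a
    · rw [PySem.List.pyRange_one_eq_nil h, List.drop_eq_nil_of_le (by omega)]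
      rfl
    · have hlt : a.toNat < counter.length := by omega
      rw [PySem.List.pyRange_one_cons (by omega), List.map_cons, List.sum_cons,
          PySem.List.pyGetD_eq_getElem counter 0 ha (by omega),
          ih (a+1) (by omega) (by omega),
          List.drop_eq_getElem_cons hlt, s2p,
          show (a+1).toNat = a.toNat + 1 by omega]

-- Σ_{i∈range(a,n)} c_i * s2p (drop (i+1)) = s3p (drop a)
theorem q3_eq (counter : List Int) :
    ∀ (t : Nat) (a : Int), 0 ≤ a → ((counter.length : Int) - a).toNat ≤ t →
    ((PySem.List.pyRange a (counter.length : Int) 1).map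
      (fun i => PySem.List.pyGetD counter i 0 * s2p (counter.drop (i+1).toNat))).sum
      = s3p (counter.drop a.toNat) := by
  intro t
  induction t with
  | zero =>
    intro a ha hle
    rw [PySem.List.pyRange_one_eq_nil (by omega), List.drop_eq_nil_of_le (by omega)]
    rfl
  | succ t ih =>
    intro a ha hle
    by_cases h : (counter.length : Int) ≤ a
    · rw [PySem.List.pyRange_one_eq_nil h, List.drop_eq_nil_of_le (by omega)]
      rfl
    · have hlt : a.toNat < counter.length := by omega
      rw [PySem.List.pyRange_one_cons (by omega), List.map_cons, List.sum_cons,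
          PySem.List.pyGetD_eq_getElem counter 0 ha (by omega),
          ih (a+1) (by omega) (by omega),
          List.drop_eq_getElem_cons hlt, s3p,
          show (a+1).toNat = a.toNat + 1 by omega]

theorem pS2_eq (counter : List Int) (i : Int) (hi : 0 ≤ i) :
    pS2 counter i = PySem.List.pyGetD counter i 0 * s2p (counter.drop (i+1).toNat) := by
  unfold pS2
  rw [List.map_congr_left (fun j hj => by
        rw [pS3_eq counter i j (by
          have := (PySem.List.mem_pyRange_one.mp hj).1; omega), mul_assoc])]
  rw [List.sum_map_mul_left, q2_eq counter ((counter.length : Int) - (i+1)).toNat (i+1) (by omega) le_rfl]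

theorem pS1_eq (counter : List Int) : pS1 counter = s3p counter := by
  unfold pS1
  rw [List.map_congr_left (fun i hi => pS2_eq counter i (PySem.List.mem_pyRange_one.mp hi).1),
      q3_eq counter (counter.length : Int).toNat 0 le_rfl (by omega)]
  simp

theorem s2p_append_singleton (p : List Int) (x : Int) :
    s2p (p ++ [x]) = s2p p + p.sum * x := by
  induction p with
  | nil => simp [s2p]
  | cons a p ih => simp [s2p, ih, List.sum_append]; ring

theorem s3p_append_singleton (p : List Int) (x : Int) :
    s3p (p ++ [x]) = s3p p + s2p p * x := by
  induction p with
  | nil => simp [s3p, s2p]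
  | cons a p ih => simp [s3p, s2p, ih, s2p_append_singleton]; ring

-- B's loop invariant: the state is (e1, e2, e3) = the three symmetric sums of the prefix, reduced mod m
theorem alt_inv :
    ∀ (l p : List Int),
    l.foldl (fun (st : Int × Int × Int) x =>
        (PySem.Int.mod (st.1 + x) 1000000007,
         PySem.Int.mod (st.2.1 + st.1 * x) 1000000007,
         PySem.Int.mod (st.2.2 + st.2.1 * x) 1000000007))
      (p.sum % 1000000007, s2p p % 1000000007, s3p p % 1000000007)
      = ((p ++ l).sum % 1000000007, s2p (p ++ l) % 1000000007, s3p (p ++ l) % 1000000007) := by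
  intro l
  induction l with
  | nil => intro p; simp
  | cons x t ih =>
    intro p
    rw [List.foldl_cons]
    have h1 : PySem.Int.mod (p.sum % 1000000007 + x) 1000000007 = (p ++ [x]).sum % 1000000007 := by
      rw [PySem.Int.mod_eq_emod_of_pos (by norm_num), Int.emod_add_emod, List.sum_append,
          List.sum_cons, List.sum_nil, add_zero]
    have h2 : PySem.Int.mod (s2p p % 1000000007 + p.sum % 1000000007 * x) 1000000007
        = s2p (p ++ [x]) % 1000000007 := by
      rw [PySem.Int.mod_eq_emod_of_pos (by norm_num), emod_add_mul_emod, s2p_append_singleton]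
    have h3 : PySem.Int.mod (s3p p % 1000000007 + s2p p % 1000000007 * x) 1000000007
        = s3p (p ++ [x]) % 1000000007 := by
      rw [PySem.Int.mod_eq_emod_of_pos (by norm_num), emod_add_mul_emod, s3p_append_singleton]
    rw [show (PySem.Int.mod (p.sum % 1000000007 + x) 1000000007,
         PySem.Int.mod (s2p p % 1000000007 + p.sum % 1000000007 * x) 1000000007,
         PySem.Int.mod (s3p p % 1000000007 + s2p p % 1000000007 * x) 1000000007)
        = ((p ++ [x]).sum % 1000000007, s2p (p ++ [x]) % 1000000007, s3p (p ++ [x]) % 1000000007) by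
          rw [h1, h2, h3], ih (p ++ [x])]
    simp

theorem solver2_alt_eq (counter : List Int) :
    solver2_alt counter = s3p counter % 1000000007 := by
  have hdef : solver2_alt counter = (counter.foldl (fun (st : Int × Int × Int) x =>
      (PySem.Int.mod (st.1 + x) 1000000007,
       PySem.Int.mod (st.2.1 + st.1 * x) 1000000007,
       PySem.Int.mod (st.2.2 + st.2.1 * x) 1000000007)) (0, 0, 0)).2.2 := rfl
  rw [hdef]
  have h0 : ((0 : Int), (0 : Int), (0 : Int))
      = (List.sum ([] : List Int) % 1000000007, s2p [] % 1000000007, s3p [] % 1000000007) := by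
    simp [s2p, s3p]
  rw [h0, alt_inv counter []]
  simp

-- ===== VERDICT (by name: the statement is the Claim_ definition above) =====
theorem solver2_spec : Claim_equal_solver2 := by
  intro counter _
  unfold Spec_solver2
  rw [solver2_eq_idx, idxS1_mod, pS1_eq, solver2_alt_eq]
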